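-- pv_equiv track=rewrite | github.com/prisant/richardson-dataset-curation | pipeline/build_bfactor_masks.py | _find_fragments
-- ===== SOURCE A (Python) =====
-- def _find_fragments(
--     all_residues: list[tuple[str, int, str]],
--     passing: set[tuple[str, int, str]],
-- ) -> list[tuple[str, int, str, int, str]]:
--     """Find contiguous fragments of passing residues.
--
--     A fragment is a maximal run of consecutive residues (by position in
--     the PDB file) that all pass the B-factor filter.
--
--     Returns list of (chain, start_resnum, start_icode, end_resnum, end_icode).
--     """
--     fragments: list[tuple[str, int, str, int, str]] = []
--
--     # Walk through all residues in file order, tracking runs of passing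
--     current_start = None
--     current_end = None
--
--     for key in all_residues:
--         if key in passing:
--             if current_start is None:
--                 current_start = key
--             current_end = key
--         else:
--             # Gap: emit current fragment if any
--             if current_start is not None:
--                 fragments.append((
--                     current_start[0], current_start[1], current_start[2],
--                     current_end[1], current_end[2],
--                 ))
--                 current_start = None
--                 current_end = None
--
--     # Emit final fragment
--     if current_start is not None:
--         fragments.append((
--             current_start[0], current_start[1], current_start[2],
--             current_end[1], current_end[2],
--         ))
--
--     return fragments
-- ===== SOURCE B (Python) =====
-- def _find_fragments(
--     all_residues: list[tuple[str, int, str]],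
--     passing: set[tuple[str, int, str]],
-- ) -> list[tuple[str, int, str, int, str]]:
--     """Boundary-detection formulation: compute the passing flags once, then
--     find run-start indices (flag set, previous flag clear) and run-end
--     indices (flag set, next flag clear) independently, zip them into runs."""
--     n = len(all_residues)
--     flags = [k in passing for k in all_residues]
--     starts = [i for i in range(n) if flags[i] and (i == 0 or not flags[i - 1])]
--     ends = [i for i in range(n) if flags[i] and (i == n - 1 or not flags[i + 1])]
--     return [
--         (all_residues[s][0], all_residues[s][1], all_residues[s][2],
--          all_residues[e][1], all_residues[e][2])
--         for s, e in zip(starts, ends)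
--     ]
-- ===== Notes on version B (the rewrite author's own statement) =====
-- stated objective: alternative
-- what changed: Replaced A's single-pass current_start/current_end state machine (gap-emit and final flush) by a staged boundary-detection computation: build a flags list once, independently collect run-start indices (flag set, previous flag clear) and run-end indices (flag set, next flag clear), then zip the two index lists and map each pair to a fragment.
import Mathlib
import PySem

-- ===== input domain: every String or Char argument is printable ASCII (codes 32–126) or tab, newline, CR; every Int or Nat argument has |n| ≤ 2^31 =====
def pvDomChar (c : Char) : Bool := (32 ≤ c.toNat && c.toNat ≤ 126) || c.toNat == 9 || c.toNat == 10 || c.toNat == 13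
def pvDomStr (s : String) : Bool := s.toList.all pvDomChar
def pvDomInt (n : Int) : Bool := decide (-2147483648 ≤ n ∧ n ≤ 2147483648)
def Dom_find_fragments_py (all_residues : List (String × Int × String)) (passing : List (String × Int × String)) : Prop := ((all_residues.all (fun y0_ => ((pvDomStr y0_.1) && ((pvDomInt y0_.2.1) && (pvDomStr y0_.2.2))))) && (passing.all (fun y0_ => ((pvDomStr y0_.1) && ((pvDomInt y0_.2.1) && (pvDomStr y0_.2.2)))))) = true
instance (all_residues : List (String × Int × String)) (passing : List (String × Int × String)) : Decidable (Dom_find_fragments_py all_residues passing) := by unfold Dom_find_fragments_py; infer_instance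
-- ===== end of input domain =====

-- B replaces A's streaming current_start/current_end state machine by a staged
-- boundary-detection computation (flags list, run-start and run-end index lists, zip);
-- same O(n) cost, different decomposition ("alternative").

-- ===== PORT A =====
-- (chain, start_resnum, start_icode, end_resnum, end_icode)
def pvFrag (s e : String × Int × String) : String × Int × String × Int × String :=
  (s.1, s.2.1, s.2.2, e.2.1, e.2.2)

-- A's "emit current fragment if any" (used at a gap and for the final flush).
def pvFlush (cs ce : Option (String × Int × String))
    (fragments : List (String × Int × String × Int × String)) :
    List (String × Int × String × Int × String) :=
  match cs, ce with
  | some s, some e => fragments ++ [pvFrag s e]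
  | _, _ => fragments

-- A's for-loop over all_residues with state (current_start, current_end, fragments);
-- the empty-list case performs the final flush.  (current_start := key if it was None
-- else unchanged  =  cs.getD key.)
def pvLoopA (passing : List (String × Int × String)) :
    List (String × Int × String) → Option (String × Int × String) →
    Option (String × Int × String) → List (String × Int × String × Int × String) →
    List (String × Int × String × Int × String)
  | [], cs, ce, fragments => pvFlush cs ce fragments
  | key :: rest, cs, ce, fragments =>
    if passing.contains key then
      pvLoopA passing rest (some (cs.getD key)) (some key) fragments
    else
      pvLoopA passing rest none none (pvFlush cs ce fragments)

def find_fragments_py (all_residues : List (String × Int × String)) (passing : List (String × Int × String)) : List (String × Int × String × Int × String) :=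
  pvLoopA passing all_residues none none []

-- ===== PORT B =====
-- Source B, step for step.  All indices Source B generates lie in range (i ∈ range n; i-1 and
-- i+1 are only read behind the 'i == 0' / 'i == n-1' short-circuit guards), so getD
-- is exact for Python's flags[...] / all_residues[...] on these inputs.
def find_fragments_py_alt (all_residues : List (String × Int × String)) (passing : List (String × Int × String)) : List (String × Int × String × Int × String) :=
  let flags := all_residues.map (fun k => passing.contains k)
  let n := all_residues.length
  let starts := (List.range n).filter
    (fun i => flags.getD i false && (i == 0 || !(flags.getD (i - 1) false)))
  let ends := (List.range n).filter
    (fun i => flags.getD i false && (i == n - 1 || !(flags.getD (i + 1) false)))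
  (starts.zip ends).map (fun se =>
    ((all_residues.getD se.1 default).1,
     (all_residues.getD se.1 default).2.1,
     (all_residues.getD se.1 default).2.2,
     (all_residues.getD se.2 default).2.1,
     (all_residues.getD se.2 default).2.2))

-- ===== PRECONDITION & SPEC =====
def Spec_find_fragments_py (all_residues : List (String × Int × String)) (passing : List (String × Int × String)) (out : List (String × Int × String × Int × String)) : Prop := out = find_fragments_py_alt all_residues passing
instance (all_residues : List (String × Int × String)) (passing : List (String × Int × String)) (out : List (String × Int × String × Int × String)) : Decidable (Spec_find_fragments_py all_residues passing out) := by unfold Spec_find_fragments_py; infer_instance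

-- ===== CLAIM (what is proved, stated in full; the proofs are below) =====
def Claim_equal_find_fragments_py : Prop := ∀ (all_residues : List (String × Int × String)) (passing : List (String × Int × String)), Dom_find_fragments_py all_residues passing → Spec_find_fragments_py all_residues passing (find_fragments_py all_residues passing)

-- ===== LEMMAS AND PROOFS =====

-- Elements at run-start positions, given the previous element's flag.
def pvS (p : (String × Int × String) → Bool) (prev : Bool) :
    List (String × Int × String) → List (String × Int × String)
  | [] => []
  | k :: rest => if p k && !prev then k :: pvS p (p k) rest else pvS p (p k) rest

-- Flag of the head (false for []), i.e. the "next" flag seen from the previous element.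
def pvHF (p : (String × Int × String) → Bool) : List (String × Int × String) → Bool
  | [] => false
  | k :: _ => p k

-- Elements at run-end positions (flag set, next flag clear).
def pvE (p : (String × Int × String) → Bool) :
    List (String × Int × String) → List (String × Int × String)
  | [] => []
  | k :: rest => (if p k && !(pvHF p rest) then [k] else []) ++ pvE p rest

def pvMk (se : (String × Int × String) × (String × Int × String)) :
    String × Int × String × Int × String := pvFrag se.1 se.2

-- The filtered-range starts list, read back through the list, is pvS.
lemma pvS_range (p : (String × Int × String) → Bool) :
    ∀ (l : List (String × Int × String)) (prev : Bool),
    ((List.range l.length).filter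
      (fun i => (l.map p).getD i false &&
        (if i == 0 then !prev else !((l.map p).getD (i - 1) false)))).map
      (fun i => l.getD i default) = pvS p prev l := by
  intro l
  induction l with
  | nil => intro prev; simp [pvS]
  | cons k rest ih =>
    intro prev
    have hr : List.range (k :: rest).length = 0 :: (List.range rest.length).map Nat.succ := by
      simp [List.range_succ_eq_map]
    rw [hr]
    simp only [List.filter_cons]
    have hshift :
        ((List.range rest.length).map Nat.succ).filter
          (fun i => (p k :: rest.map p).getD i false &&
            (if i == 0 then !prev else !((p k :: rest.map p).getD (i - 1) false))) =
        ((List.range rest.length).filter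
          (fun i => (rest.map p).getD i false &&
            (if i == 0 then !(p k) else !((rest.map p).getD (i - 1) false)))).map Nat.succ := by
      rw [List.filter_map]
      congr 1
      apply List.filter_congr
      intro i _
      cases i with
      | zero => simp
      | succ j => simp
    have hcomp : ((fun i => (k :: rest).getD i default) ∘ Nat.succ) =
        (fun i => rest.getD i default) := by funext i; simp
    by_cases hk : (p k && !prev) = true
    · rw [if_pos (by simpa using hk)]
      simp only [List.map_cons]
      rw [hshift, List.map_map, hcomp, ih (p k)]
      simp [pvS, hk]
    · rw [if_neg (by simpa using hk)]
      simp only [List.map_cons]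
      rw [hshift, List.map_map, hcomp, ih (p k)]
      simp [pvS, hk]

-- The filtered-range ends list, read back through the list, is pvE.
lemma pvE_range (p : (String × Int × String) → Bool) :
    ∀ (l : List (String × Int × String)),
    ((List.range l.length).filter
      (fun i => (l.map p).getD i false && !((l.map p).getD (i + 1) false))).map
      (fun i => l.getD i default) = pvE p l := by
  intro l
  induction l with
  | nil => simp [pvE]
  | cons k rest ih =>
    have hr : List.range (k :: rest).length = 0 :: (List.range rest.length).map Nat.succ := by
      simp [List.range_succ_eq_map]
    rw [hr]
    simp only [List.filter_cons]
    have hshift :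
        ((List.range rest.length).map Nat.succ).filter
          (fun i => (p k :: rest.map p).getD i false && !((p k :: rest.map p).getD (i + 1) false)) =
        ((List.range rest.length).filter
          (fun i => (rest.map p).getD i false && !((rest.map p).getD (i + 1) false))).map Nat.succ := by
      rw [List.filter_map]
      rfl
    have hhead : ((p k :: rest.map p).getD 0 false && !((p k :: rest.map p).getD 1 false)) =
        (p k && !(pvHF p rest)) := by
      cases rest <;> simp [pvHF]
    have hcomp : ((fun i => (k :: rest).getD i default) ∘ Nat.succ) =
        (fun i => rest.getD i default) := by funext i; simp
    by_cases hk : (p k && !(pvHF p rest)) = true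
    · simp only [List.map_cons]
      rw [hhead, if_pos hk]
      simp only [List.map_cons]
      rw [hshift, List.map_map, hcomp, ih]
      simp [pvE, hk]
    · simp only [List.map_cons]
      rw [hhead, if_neg hk]
      rw [hshift, List.map_map, hcomp, ih]
      simp [pvE, hk]

-- A's loop, in terms of the start/end element lists.
lemma pvLoop_inv (passing : List (String × Int × String)) :
    ∀ (l : List (String × Int × String)),
    (∀ fr, pvLoopA passing l none none fr =
      fr ++ ((pvS (fun k => passing.contains k) false l).zip
              (pvE (fun k => passing.contains k) l)).map pvMk) ∧
    (∀ s e fr, pvLoopA passing l (some s) (some e) fr =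
      fr ++ ((s :: pvS (fun k => passing.contains k) true l).zip
              ((if pvHF (fun k => passing.contains k) l then [] else [e]) ++
                pvE (fun k => passing.contains k) l)).map pvMk) := by
  intro l
  set p : (String × Int × String) → Bool := fun k => passing.contains k with hp
  induction l with
  | nil => simp [pvLoopA, pvFlush, pvS, pvE, pvHF, pvMk, pvFrag]
  | cons k rest ih =>
    obtain ⟨ihN, ihS⟩ := ih
    by_cases hk : p k = true
    · have hkc : passing.contains k = true := hk
      have e1 : pvS p false (k :: rest) = k :: pvS p true rest := by simp [pvS, hk]
      have e2 : pvS p true (k :: rest) = pvS p true rest := by simp [pvS, hk]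
      have e3 : pvE p (k :: rest) = (if pvHF p rest then [] else [k]) ++ pvE p rest := by
        by_cases hh : pvHF p rest = true <;> simp [pvE, hk, hh]
      have e4 : pvHF p (k :: rest) = true := by simp [pvHF, hk]
      constructor
      · intro fr
        have h1 : pvLoopA passing (k :: rest) none none fr
            = pvLoopA passing rest (some k) (some k) fr := by
          simp only [pvLoopA]; rw [if_pos hkc]; rfl
        rw [h1, ihS k k fr, e1, e3]
      · intro s e fr
        have h1 : pvLoopA passing (k :: rest) (some s) (some e) fr
            = pvLoopA passing rest (some s) (some k) fr := by
          simp only [pvLoopA]; rw [if_pos hkc]; rfl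
        rw [h1, ihS s k fr, e2, e3, e4]
        simp
    · have hk' : p k = false := by simpa using hk
      have hkc : passing.contains k = false := hk'
      have f1 : pvS p false (k :: rest) = pvS p false rest := by simp [pvS, hk']
      have f2 : pvS p true (k :: rest) = pvS p false rest := by simp [pvS, hk']
      have f3 : pvE p (k :: rest) = pvE p rest := by simp [pvE, hk', pvHF]
      have f4 : pvHF p (k :: rest) = false := by simp [pvHF, hk']
      have hneg : ¬ (passing.contains k = true) := by rw [hkc]; simp
      constructor
      · intro fr
        have h1 : pvLoopA passing (k :: rest) none none fr
            = pvLoopA passing rest none none fr := by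
          simp only [pvLoopA, pvFlush]; rw [if_neg hneg]
        rw [h1, ihN fr, f1, f3]
      · intro s e fr
        have h1 : pvLoopA passing (k :: rest) (some s) (some e) fr
            = pvLoopA passing rest none none (fr ++ [pvFrag s e]) := by
          simp only [pvLoopA, pvFlush]; rw [if_neg hneg]
        rw [h1, ihN (fr ++ [pvFrag s e]), f2, f3, f4]
        simp [pvMk]

-- Normalizing B's filter conditions to the prev/next forms of the bridge lemmas.
lemma pvStarts_cond (p : (String × Int × String) → Bool) (l : List (String × Int × String)) :
    (List.range l.length).filter
      (fun i => (l.map p).getD i false && (i == 0 || !((l.map p).getD (i - 1) false))) =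
    (List.range l.length).filter
      (fun i => (l.map p).getD i false &&
        (if i == 0 then !false else !((l.map p).getD (i - 1) false))) := by
  apply List.filter_congr
  intro i _
  cases i <;> simp

lemma pvEnds_cond (p : (String × Int × String) → Bool) (l : List (String × Int × String)) :
    (List.range l.length).filter
      (fun i => (l.map p).getD i false && (i == l.length - 1 || !((l.map p).getD (i + 1) false))) =
    (List.range l.length).filter
      (fun i => (l.map p).getD i false && !((l.map p).getD (i + 1) false)) := by
  apply List.filter_congr
  intro i hi
  have hi' : i < l.length := List.mem_range.mp hi
  by_cases h : i = l.length - 1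
  · subst h
    have hlast : (l.map p).getD (l.length - 1 + 1) false = false := by
      apply List.getD_eq_default
      simp
      omega
    rw [hlast]
    simp
  · have hne : (i == l.length - 1) = false := by simp [h]
    rw [hne]
    simp

-- ===== VERDICT (by name: the statement is the Claim_ definition above) =====
theorem find_fragments_py_spec : Claim_equal_find_fragments_py := by
  intro all_residues passing _
  unfold Spec_find_fragments_py find_fragments_py find_fragments_py_alt
  dsimp only
  set p : (String × Int × String) → Bool := fun k => passing.contains k with hp
  rw [pvStarts_cond p all_residues, pvEnds_cond p all_residues]
  have hz :
      (((List.range all_residues.length).filter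
          (fun i => (all_residues.map p).getD i false &&
            (if i == 0 then !false else !((all_residues.map p).getD (i - 1) false)))).zip
        ((List.range all_residues.length).filter
          (fun i => (all_residues.map p).getD i false &&
            !((all_residues.map p).getD (i + 1) false)))).map
        (fun se =>
          ((all_residues.getD se.1 default).1,
           (all_residues.getD se.1 default).2.1,
           (all_residues.getD se.1 default).2.2,
           (all_residues.getD se.2 default).2.1,
           (all_residues.getD se.2 default).2.2)) =
      ((pvS p false all_residues).zip (pvE p all_residues)).map pvMk := by
    rw [← pvS_range p all_residues false, ← pvE_range p all_residues]
    rw [List.zip_map, List.map_map]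
    rfl
  rw [hz, (pvLoop_inv passing all_residues).1 []]
  simp only [List.nil_append]
  rfl
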